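-- pv_equiv track=rewrite | github.com/Solam-Eteva/Manus_Aural_Sentience | src/resonance_lexicon.py | _create_biometric_poetry
-- ===== SOURCE A (Python) =====
-- def _create_biometric_poetry(biometric_correlates):
--     """Create poetic interpretations of biometric correlates"""
--     poetry = {}
--
--     for correlate_type, description in biometric_correlates.items():
--         if "heart" in description.lower():
--             poetry[correlate_type] = {
--                 "poetic_description": "Your heart may find its rhythm in these frequencies",
--                 "invitation": "Notice how your heartbeat wants to dance with this music"
--             }
--         elif "breath" in description.lower():
--             poetry[correlate_type] = {
--                 "poetic_description": "These sounds invite your breath to find new patterns",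
--                 "invitation": "Allow your breathing to be guided by the musical flow"
--             }
--         elif "nervous" in description.lower():
--             poetry[correlate_type] = {
--                 "poetic_description": "Your nervous system may find balance in these frequencies",
--                 "invitation": "Feel how this music invites your whole being to relax or activate"
--             }
--         else:
--             poetry[correlate_type] = {
--                 "poetic_description": "Your body wisdom may respond to these sonic patterns",
--                 "invitation": "Trust what your body knows about this music"
--             }
--
--     return poetry
-- ===== SOURCE B (Python) =====
-- _DEFAULT = {
--     "poetic_description": "Your body wisdom may respond to these sonic patterns",
--     "invitation": "Trust what your body knows about this music"
-- }
--
-- # Repainting order: lowest priority first, highest ("heart") last.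
-- _PRIORITY = [
--     ("nervous", {
--         "poetic_description": "Your nervous system may find balance in these frequencies",
--         "invitation": "Feel how this music invites your whole being to relax or activate"
--     }),
--     ("breath", {
--         "poetic_description": "These sounds invite your breath to find new patterns",
--         "invitation": "Allow your breathing to be guided by the musical flow"
--     }),
--     ("heart", {
--         "poetic_description": "Your heart may find its rhythm in these frequencies",
--         "invitation": "Notice how your heartbeat wants to dance with this music"
--     }),
-- ]
--
--
-- def _create_biometric_poetry(biometric_correlates):
--     """Create poetic interpretations of biometric correlates.
--
--     Staged 'painting': first give every correlate the default poem, then for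
--     each keyword from lowest to highest priority repaint the entries whose
--     description mentions it; the last (highest-priority) repaint wins.
--     """
--     poetry = {correlate_type: _DEFAULT for correlate_type in biometric_correlates}
--     for keyword, poem in _PRIORITY:
--         for correlate_type, description in biometric_correlates.items():
--             if keyword in description.lower():
--                 poetry[correlate_type] = poem
--     return poetry
-- ===== Notes on version B (the rewrite author's own statement) =====
-- stated objective: alternative
-- what changed: Instead of a single pass with an if/elif first-match chain per entry, B does staged passes: it first assigns every correlate the default poem, then sweeps the items once per keyword from lowest to highest priority, repainting matching entries so the last (highest-priority) write wins; Pre_ excludes association lists with duplicate keys, which do not encode any Python dict input.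
import Mathlib
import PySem

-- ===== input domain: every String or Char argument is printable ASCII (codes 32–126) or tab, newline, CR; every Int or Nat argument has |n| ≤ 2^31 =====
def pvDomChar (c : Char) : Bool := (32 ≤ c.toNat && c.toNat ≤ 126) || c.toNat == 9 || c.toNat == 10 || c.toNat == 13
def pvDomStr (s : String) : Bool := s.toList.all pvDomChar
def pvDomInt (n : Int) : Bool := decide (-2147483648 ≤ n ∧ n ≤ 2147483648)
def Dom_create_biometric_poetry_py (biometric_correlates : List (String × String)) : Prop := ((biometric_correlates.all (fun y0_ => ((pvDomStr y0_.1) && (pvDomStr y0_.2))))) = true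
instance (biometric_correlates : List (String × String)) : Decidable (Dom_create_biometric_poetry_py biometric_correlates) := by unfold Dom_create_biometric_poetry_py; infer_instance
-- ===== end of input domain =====

-- B replaces A's per-entry if/elif first-match chain with staged passes: assign every
-- correlate the default poem, then repaint matching entries once per keyword from lowest
-- to highest priority (alternative decomposition, same cost).


-- ===== PORT A =====
-- A's if/elif chain, one branch per keyword, folded over the items into a Dict.
def pvStepA (poetry : PySem.Dict String (List (String × String))) (p : String × String) :
    PySem.Dict String (List (String × String)) :=
  if PySem.Str.isIn "heart" (PySem.Str.lower p.2) then
    poetry.insert p.1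
      [("poetic_description", "Your heart may find its rhythm in these frequencies"),
       ("invitation", "Notice how your heartbeat wants to dance with this music")]
  else if PySem.Str.isIn "breath" (PySem.Str.lower p.2) then
    poetry.insert p.1
      [("poetic_description", "These sounds invite your breath to find new patterns"),
       ("invitation", "Allow your breathing to be guided by the musical flow")]
  else if PySem.Str.isIn "nervous" (PySem.Str.lower p.2) then
    poetry.insert p.1
      [("poetic_description", "Your nervous system may find balance in these frequencies"),
       ("invitation", "Feel how this music invites your whole being to relax or activate")]
  else
    poetry.insert p.1
      [("poetic_description", "Your body wisdom may respond to these sonic patterns"),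
       ("invitation", "Trust what your body knows about this music")]

def create_biometric_poetry_py (biometric_correlates : List (String × String)) :
    List (String × List (String × String)) :=
  (biometric_correlates.foldl pvStepA PySem.Dict.empty).items

-- ===== PORT B =====
-- B: staged painting (Source B): every correlate gets the default poem, then one sweep per
-- keyword from lowest to highest priority repaints matching entries; last write wins.
def pvDefault : List (String × String) :=
  [("poetic_description", "Your body wisdom may respond to these sonic patterns"),
   ("invitation", "Trust what your body knows about this music")]

def pvPriority : List (String × List (String × String)) :=
  [("nervous",
     [("poetic_description", "Your nervous system may find balance in these frequencies"),
      ("invitation", "Feel how this music invites your whole being to relax or activate")]),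
   ("breath",
     [("poetic_description", "These sounds invite your breath to find new patterns"),
      ("invitation", "Allow your breathing to be guided by the musical flow")]),
   ("heart",
     [("poetic_description", "Your heart may find its rhythm in these frequencies"),
      ("invitation", "Notice how your heartbeat wants to dance with this music")])]

-- the inner 'for correlate_type, description in biometric_correlates.items()' sweep
def pvPaint (biometric_correlates : List (String × String))
    (poetry : PySem.Dict String (List (String × String)))
    (rule : String × List (String × String)) :
    PySem.Dict String (List (String × String)) :=
  biometric_correlates.foldl
    (fun d p => if PySem.Str.isIn rule.1 (PySem.Str.lower p.2) then d.insert p.1 rule.2 else d)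
    poetry

def create_biometric_poetry_py_alt (biometric_correlates : List (String × String)) :
    List (String × List (String × String)) :=
  let poetry := biometric_correlates.foldl (fun d p => d.insert p.1 pvDefault) PySem.Dict.empty
  (pvPriority.foldl (pvPaint biometric_correlates) poetry).items

-- ===== PRECONDITION & SPEC =====
-- Pre_ excludes association lists with duplicate keys: the Python argument is a dict,
-- which cannot hold duplicate keys, so such lists do not encode any actual input.
def Pre_create_biometric_poetry_py (biometric_correlates : List (String × String)) : Prop :=
  (biometric_correlates.map Prod.fst).Nodup
instance (biometric_correlates : List (String × String)) : Decidable (Pre_create_biometric_poetry_py biometric_correlates) := by unfold Pre_create_biometric_poetry_py; infer_instance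

def pvWitness_create_biometric_poetry_py : (List (String × String)) :=
  [("hrv", "Heart rate variability"), ("resp", "breathing depth"), ("skin", "conductance")]

def Spec_create_biometric_poetry_py (biometric_correlates : List (String × String)) (out : List (String × List (String × String))) : Prop := out = create_biometric_poetry_py_alt biometric_correlates
instance (biometric_correlates : List (String × String)) (out : List (String × List (String × String))) : Decidable (Spec_create_biometric_poetry_py biometric_correlates out) := by unfold Spec_create_biometric_poetry_py; infer_instance

-- ===== CLAIM (what is proved, stated in full; the proofs are below) =====
def Claim_equal_create_biometric_poetry_py : Prop := ∀ (biometric_correlates : List (String × String)), Dom_create_biometric_poetry_py biometric_correlates → Pre_create_biometric_poetry_py biometric_correlates → Spec_create_biometric_poetry_py biometric_correlates (create_biometric_poetry_py biometric_correlates)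

-- ===== LEMMAS AND PROOFS =====

-- A's branch chain as a value-level choice
def pvChoose (desc : String) : List (String × String) :=
  if PySem.Str.isIn "heart" (PySem.Str.lower desc) then
    [("poetic_description", "Your heart may find its rhythm in these frequencies"),
     ("invitation", "Notice how your heartbeat wants to dance with this music")]
  else if PySem.Str.isIn "breath" (PySem.Str.lower desc) then
    [("poetic_description", "These sounds invite your breath to find new patterns"),
     ("invitation", "Allow your breathing to be guided by the musical flow")]
  else if PySem.Str.isIn "nervous" (PySem.Str.lower desc) then
    [("poetic_description", "Your nervous system may find balance in these frequencies"),
     ("invitation", "Feel how this music invites your whole being to relax or activate")]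
  else pvDefault

theorem pvStepA_eq (d : PySem.Dict String (List (String × String))) (p : String × String) :
    pvStepA d p = d.insert p.1 (pvChoose p.2) := by
  unfold pvStepA pvChoose pvDefault; split_ifs <;> rfl

-- One painting sweep over a dict whose items are 'pre ++ l.map (fun p => (p.1, g p))'
-- (keys of pre disjoint from keys of l, keys of l distinct) updates the map pointwise.
theorem pvPaint_items (c : String × String → Bool) (poem : List (String × String))
    (l : List (String × String)) (g : String × String → List (String × String))
    (pre : List (String × List (String × String)))
    (d : PySem.Dict String (List (String × String)))
    (hnd : (l.map Prod.fst).Nodup)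
    (hdisj : ∀ q ∈ pre, ∀ a ∈ l, q.1 ≠ a.1)
    (hitems : d.items = pre ++ l.map (fun a => (a.1, g a))) :
    (l.foldl (fun d a => if c a then d.insert a.1 poem else d) d).items
      = pre ++ l.map (fun a => (a.1, if c a then poem else g a)) := by
  induction l generalizing pre d with
  | nil => simpa using hitems
  | cons a t ih =>
    simp only [List.map_cons, List.nodup_cons] at hnd
    have hta : ∀ b ∈ t, a.1 ≠ b.1 := by
      intro b hb hEq
      exact hnd.1 (hEq ▸ List.mem_map_of_mem hb)
    simp only [List.foldl_cons]
    by_cases hc : c a = true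
    · have hcont : d.contains a.1 = true := by
        have hmem : (a.1, g a) ∈ d.items := by
          rw [hitems]; exact List.mem_append_right _ (by simp)
        have hk : a.1 ∈ d.keys := by
          simpa [PySem.Dict.keys] using List.mem_map_of_mem (f := Prod.fst) hmem
        exact (PySem.Dict.contains_iff_mem_keys _ _).mpr hk
      have hins : (d.insert a.1 poem).items
          = (pre ++ [(a.1, poem)]) ++ t.map (fun b => (b.1, g b)) := by
        have h1 : pre.map (fun q => if q.1 == a.1 then (a.1, poem) else q) = pre := by
          rw [List.map_congr_left (g := id), List.map_id]
          intro q hq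
          simp [hdisj q hq a (by simp)]
        rw [PySem.Dict.items_insert, hcont, if_pos rfl, hitems]
        simp only [List.map_append, List.map_cons, List.map_map, List.append_assoc,
          List.singleton_append]
        rw [h1]
        congr 1
        congr 1
        · simp
        · exact List.map_congr_left (fun b hb => by simp [Function.comp, (hta b hb).symm])
      have hrec := ih (pre ++ [(a.1, poem)]) (d.insert a.1 poem) hnd.2
        (by
          intro q hq b hb
          rcases List.mem_append.mp hq with h | h
          · exact hdisj q h b (by simp [hb])
          · simp at h; subst h; exact hta b hb)
        hins
      rw [if_pos hc, hrec]
      simp [hc]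
    · have hne : c a = false := by simpa using hc
      have hrec := ih (pre ++ [(a.1, g a)]) d hnd.2
        (by
          intro q hq b hb
          rcases List.mem_append.mp hq with h | h
          · exact hdisj q h b (by simp [hb])
          · simp at h; subst h; exact hta b hb)
        (by rw [hitems]; simp)
      rw [if_neg hc, hrec]
      simp [hne]

theorem main_eq (l : List (String × String))
    (hpre : (l.map Prod.fst).Nodup) :
    create_biometric_poetry_py l = create_biometric_poetry_py_alt l := by
  unfold create_biometric_poetry_py create_biometric_poetry_py_alt
  -- A's side: one fresh insert per distinct key
  have hA : (l.foldl pvStepA PySem.Dict.empty).items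
      = l.map (fun p => (p.1, pvChoose p.2)) := by
    have h := PySem.Dict.items_foldl_insert_fresh (d := PySem.Dict.empty)
      (l := l) (k := Prod.fst) (v := fun p => pvChoose p.2)
      (by intro a _; simp [PySem.Dict.contains_empty]) hpre
    have hfe : pvStepA = fun d (p : String × String) => d.insert p.1 (pvChoose p.2) := by
      funext d p; exact pvStepA_eq d p
    rw [hfe]; simpa using h
  -- B's side: default pass then three painting sweeps
  have hD : (l.foldl (fun d (p : String × String) => d.insert p.1 pvDefault)
      PySem.Dict.empty).items = l.map (fun p => (p.1, pvDefault)) := by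
    have h := PySem.Dict.items_foldl_insert_fresh (d := PySem.Dict.empty)
      (l := l) (k := Prod.fst) (v := fun _ => pvDefault)
      (by intro a _; simp [PySem.Dict.contains_empty]) hpre
    simpa using h
  simp only [pvPriority, List.foldl_cons, List.foldl_nil, pvPaint]
  have h1 := pvPaint_items (fun p => PySem.Str.isIn "nervous" (PySem.Str.lower p.2))
    [("poetic_description", "Your nervous system may find balance in these frequencies"),
     ("invitation", "Feel how this music invites your whole being to relax or activate")]
    l (fun _ => pvDefault) [] _ hpre (by simp) (hD.trans (List.nil_append _).symm)
  have h2 := pvPaint_items (fun p => PySem.Str.isIn "breath" (PySem.Str.lower p.2))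
    [("poetic_description", "These sounds invite your breath to find new patterns"),
     ("invitation", "Allow your breathing to be guided by the musical flow")]
    l (fun a => if PySem.Str.isIn "nervous" (PySem.Str.lower a.2) then
        [("poetic_description", "Your nervous system may find balance in these frequencies"),
         ("invitation", "Feel how this music invites your whole being to relax or activate")]
      else pvDefault)
    [] _ hpre (by simp) (h1.trans (List.nil_append _).symm)
  have h3 := pvPaint_items (fun p => PySem.Str.isIn "heart" (PySem.Str.lower p.2))
    [("poetic_description", "Your heart may find its rhythm in these frequencies"),
     ("invitation", "Notice how your heartbeat wants to dance with this music")]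
    l (fun a => if PySem.Str.isIn "breath" (PySem.Str.lower a.2) then
        [("poetic_description", "These sounds invite your breath to find new patterns"),
         ("invitation", "Allow your breathing to be guided by the musical flow")]
      else if PySem.Str.isIn "nervous" (PySem.Str.lower a.2) then
        [("poetic_description", "Your nervous system may find balance in these frequencies"),
         ("invitation", "Feel how this music invites your whole being to relax or activate")]
      else pvDefault)
    [] _ hpre (by simp) (h2.trans (List.nil_append _).symm)
  rw [hA]
  simp only [List.nil_append] at h3
  rw [h3]
  apply List.map_congr_left
  intro p _
  unfold pvChoose
  rfl

-- ===== VERDICT (by name: the statement is the Claim_ definition above) =====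
theorem create_biometric_poetry_py_spec : Claim_equal_create_biometric_poetry_py := by
  intro l _ hpre
  exact main_eq l hpre
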